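-- pv_equiv track=rewrite | github.com/samarghachem6/ENSI-Chat | info_master.py | group_fragments
-- ===== SOURCE A (Python) =====
-- def group_fragments(lines):
--     grouped = []
--     buffer = ""
--     for line in lines:
--         if line.startswith("UO1"):
--             break
--         if line.startswith("UF"):
--             if buffer:
--                 grouped.append(buffer.strip())
--             buffer = line
--         else:
--             buffer += " " + line
--     if buffer:
--         grouped.append(buffer.strip())
--     return grouped
-- ===== SOURCE B (Python) =====
-- def group_fragments(lines):
--     # Truncate at the first 'UO1' line, then segment the truncated list by
--     # scanning it in REVERSE: each 'UF' line closes the segment built so far.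
--     trunc = []
--     for line in lines:
--         if line.startswith("UO1"):
--             break
--         trunc.append(line)
--     segs = []
--     cur = []
--     for line in reversed(trunc):
--         cur.append(line)
--         if line.startswith("UF"):
--             cur.reverse()
--             segs.append(cur)
--             cur = []
--     if cur:
--         cur.reverse()
--         segs.append(cur)
--     segs.reverse()
--     return [' '.join(seg).strip() for seg in segs]
-- ===== Notes on version B (the rewrite author's own statement) =====
-- stated objective: alternative
-- what changed: B replaces A's single left-to-right loop with a mutated string buffer by a three-phase pipeline: truncate at the first 'UO1' line, segment the truncated list by a reverse scan that closes a list segment at each 'UF' marker, then join/strip each segment at the end.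
import Mathlib
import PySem

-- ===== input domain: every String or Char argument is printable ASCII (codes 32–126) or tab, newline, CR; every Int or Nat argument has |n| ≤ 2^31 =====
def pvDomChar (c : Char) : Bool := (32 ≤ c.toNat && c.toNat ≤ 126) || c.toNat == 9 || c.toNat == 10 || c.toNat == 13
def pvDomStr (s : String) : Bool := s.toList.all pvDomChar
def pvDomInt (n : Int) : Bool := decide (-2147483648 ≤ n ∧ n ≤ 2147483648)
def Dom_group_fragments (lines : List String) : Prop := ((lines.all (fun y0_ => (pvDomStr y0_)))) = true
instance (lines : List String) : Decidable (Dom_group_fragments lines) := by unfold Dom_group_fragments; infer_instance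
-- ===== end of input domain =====

-- B truncates at the first 'UO1' line first, then segments the truncated list by a
-- reverse scan closing a segment at each 'UF' line, and joins each segment at the end
-- (alternative decomposition; no speed claim).

-- ===== PORT A =====
-- A's loop: state (grouped, buffer); buffer kept as List Char (Python str concatenation,
-- ported on the char-list side as PYSEM.md directs; String.append is kernel-opaque).
def gfLoopA : List String → List String → List Char → List String
  | [], grouped, buffer =>
      if buffer ≠ [] then grouped ++ [String.ofList (PySem.Chars.strip buffer)] else grouped
  | line :: rest, grouped, buffer =>
      if PySem.Str.startswith line "UO1" then
        -- break, then the final 'if buffer' emit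
        (if buffer ≠ [] then grouped ++ [String.ofList (PySem.Chars.strip buffer)] else grouped)
      else if PySem.Str.startswith line "UF" then
        gfLoopA rest
          (if buffer ≠ [] then grouped ++ [String.ofList (PySem.Chars.strip buffer)] else grouped)
          line.toList
      else
        gfLoopA rest grouped (buffer ++ ' ' :: line.toList)

def group_fragments (lines : List String) : List String :=
  gfLoopA lines [] []

-- ===== PORT B =====
-- truncation loop (for … if startswith "UO1": break; trunc.append(line))
def gfTrunc : List String → List String
  | [] => []
  | line :: rest =>
      if PySem.Str.startswith line "UO1" then [] else line :: gfTrunc rest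

-- one step of the 'for line in reversed(trunc)' loop, state (segs, cur)
def gfRevStep (sc : List (List String) × List String) (line : String) :
    List (List String) × List String :=
  let cur := sc.2 ++ [line]
  if PySem.Str.startswith line "UF" then (sc.1 ++ [cur.reverse], []) else (sc.1, cur)

def gfRender (seg : List String) : String :=
  String.ofList (PySem.Chars.strip (PySem.Chars.join [' '] (seg.map String.toList)))

def group_fragments_alt (lines : List String) : List String :=
  let sc := (gfTrunc lines).reverse.foldl gfRevStep ([], [])
  ((if sc.2 ≠ [] then sc.1 ++ [sc.2.reverse] else sc.1).reverse).map gfRender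

-- ===== PRECONDITION & SPEC =====
def Spec_group_fragments (lines : List String) (out : List String) : Prop := out = group_fragments_alt lines
instance (lines : List String) (out : List String) : Decidable (Spec_group_fragments lines out) := by unfold Spec_group_fragments; infer_instance

-- ===== CLAIM (what is proved, stated in full; the proofs are below) =====
def Claim_equal_group_fragments : Prop := ∀ (lines : List String), Dom_group_fragments lines → Spec_group_fragments lines (group_fragments lines)

-- ===== LEMMAS AND PROOFS =====

-- proof-side recursive view of B's reverse scan (right-to-left recursion)
def gfRev : List String → List (List String) × List String
  | [] => ([], [])
  | line :: rest =>
      let sc := gfRev rest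
      let cur := line :: sc.2
      if PySem.Str.startswith line "UF" then (cur :: sc.1, []) else (sc.1, cur)

-- B's foldl over the reversed list computes gfRev with both components reversed
lemma foldl_gfRevStep_eq (ts : List String) :
    ts.reverse.foldl gfRevStep ([], []) = ((gfRev ts).1.reverse, (gfRev ts).2.reverse) := by
  induction ts with
  | nil => rfl
  | cons l ls ih =>
      by_cases h2 : PySem.Chars.startswith l.toList ['U', 'F'] <;>
        simp [gfRev, gfRevStep, List.foldl_append, ih, h2]

-- A's loop, restricted to the truncated list (no 'UO1' case fires inside gfTrunc's output)
lemma gfLoopA_trunc (lines : List String) (grouped : List String) (buffer : List Char) :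
    gfLoopA lines grouped buffer = gfLoopA (gfTrunc lines) grouped buffer := by
  induction lines generalizing grouped buffer with
  | nil => rfl
  | cons l ls ih =>
      by_cases h1 : PySem.Chars.startswith l.toList ['U', 'O', '1']
      · simp [gfLoopA, gfTrunc, h1]
      · by_cases h2 : PySem.Chars.startswith l.toList ['U', 'F'] <;>
          simp [gfLoopA, gfTrunc, h1, h2, ih]

lemma strip_space_cons (cs : List Char) :
    PySem.Chars.strip (' ' :: cs) = PySem.Chars.strip cs := by
  simp [PySem.Chars.strip, PySem.Chars.lstrip, PySem.Chars.isspace]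

lemma join_space_cons (a : List Char) (rest : List (List Char)) :
    PySem.Chars.join [' '] (a :: rest) = a ++ (rest.map (fun t => ' ' :: t)).flatten := by
  induction rest generalizing a with
  | nil => simp [PySem.Chars.join, List.intercalate]
  | cons b bs ih => simp only [PySem.Chars.join, List.intercalate, List.intersperse] at *; simp_all

-- a line starting with "UF" has a nonempty char list
lemma toList_ne_nil_of_startswith_UF (l : String)
    (h : PySem.Chars.startswith l.toList ['U', 'F']) : l.toList ≠ [] := by
  intro hnil
  rw [hnil] at h
  simp [PySem.Chars.startswith] at h

-- the pending buffer of a segment, as A accumulates it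
def gfPend (buffer : List Char) (cur : List String) : List Char :=
  buffer ++ (cur.map (fun l => ' ' :: l.toList)).flatten

-- gfTrunc's output contains no 'UO1' line
lemma gfTrunc_no_UO1 (lines : List String) :
    ∀ l ∈ gfTrunc lines, ¬ PySem.Chars.startswith l.toList ['U', 'O', '1'] = true := by
  induction lines with
  | nil => simp [gfTrunc]
  | cons l ls ih =>
      by_cases h1 : PySem.Chars.startswith l.toList ['U', 'O', '1'] <;>
        simp_all [gfTrunc]

-- main invariant: A's loop over a UO1-free list equals B's reverse-scan segmentation
lemma gfLoopA_eq_rev (ts : List String)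
    (hno : ∀ l ∈ ts, ¬ PySem.Chars.startswith l.toList ['U', 'O', '1'] = true)
    (grouped : List String) (buffer : List Char) :
    gfLoopA ts grouped buffer =
      (if gfPend buffer (gfRev ts).2 ≠ [] then
         grouped ++ [String.ofList (PySem.Chars.strip (gfPend buffer (gfRev ts).2))]
       else grouped) ++ (gfRev ts).1.map gfRender := by
  induction ts generalizing grouped buffer with
  | nil => simp [gfLoopA, gfRev, gfPend]
  | cons l ls ih =>
      have h1 : ¬ PySem.Chars.startswith l.toList ['U', 'O', '1'] = true :=
        hno l (by simp)
      have ih := ih (fun x hx => hno x (by simp [hx]))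
      by_cases h2 : PySem.Chars.startswith l.toList ['U', 'F']
      · -- UF line: close the current segment
        have hne : l.toList ≠ [] := toList_ne_nil_of_startswith_UF l h2
        have hgl : gfLoopA (l :: ls) grouped buffer =
            gfLoopA ls
              (if buffer ≠ [] then grouped ++ [String.ofList (PySem.Chars.strip buffer)] else grouped)
              l.toList := by
          simp [gfLoopA, h1, h2]
        have hgr : gfRev (l :: ls) = ((l :: (gfRev ls).2) :: (gfRev ls).1, []) := by
          simp [gfRev, h2]
        rw [hgl, ih, hgr]
        have hp : gfPend l.toList (gfRev ls).2 ≠ [] := by simp [gfPend, hne]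
        have hr : gfRender (l :: (gfRev ls).2) =
            String.ofList (PySem.Chars.strip (gfPend l.toList (gfRev ls).2)) := by
          simp [gfRender, gfPend, join_space_cons, Function.comp_def]
        rw [if_pos hp]
        by_cases hb : buffer ≠ [] <;>
          simp [hb, gfPend, hr, List.append_assoc]
      · -- ordinary line: extend the buffer / the current segment
        have hgl : gfLoopA (l :: ls) grouped buffer =
            gfLoopA ls grouped (buffer ++ ' ' :: l.toList) := by
          simp [gfLoopA, h1, h2]
        have hgr : gfRev (l :: ls) = ((gfRev ls).1, l :: (gfRev ls).2) := by
          simp [gfRev, h2]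
        rw [hgl, ih, hgr]
        have hpend : gfPend (buffer ++ ' ' :: l.toList) (gfRev ls).2 =
            gfPend buffer (l :: (gfRev ls).2) := by
          simp [gfPend]
        rw [hpend]

-- the top-level pending buffer renders exactly like B's leading segment
lemma pend_nil_render (cur : List String) (h : cur ≠ []) :
    String.ofList (PySem.Chars.strip (gfPend [] cur)) = gfRender cur := by
  cases cur with
  | nil => simp at h
  | cons c cs =>
      simp [gfPend, gfRender, join_space_cons, strip_space_cons, Function.comp_def]

lemma pend_nil_ne_nil_iff (cur : List String) : gfPend [] cur ≠ [] ↔ cur ≠ [] := by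
  cases cur <;> simp [gfPend]

-- ===== VERDICT (by name: the statement is the Claim_ definition above) =====
theorem group_fragments_spec : Claim_equal_group_fragments := by
  intro lines _
  show group_fragments lines = group_fragments_alt lines
  unfold group_fragments group_fragments_alt
  rw [gfLoopA_trunc, gfLoopA_eq_rev _ (gfTrunc_no_UO1 lines), foldl_gfRevStep_eq]
  simp only [List.reverse_eq_nil_iff, ne_eq]
  by_cases h : (gfRev (gfTrunc lines)).2 ≠ []
  · rw [if_pos ((pend_nil_ne_nil_iff _).2 h), if_pos h, pend_nil_render _ h]
    simp
  · simp only [ne_eq, not_not] at h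
    simp [h, gfPend]
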